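-- pv_equiv track=rewrite | github.com/Raparthi-Arun/Ai-Nutrition-Scanner | backend/api/local_food_detector.py | _get_color_profile
-- ===== SOURCE A (Python) =====
-- def _get_color_profile(avg_r: int, avg_g: int, avg_b: int,
--                       r_vals: list, g_vals: list, b_vals: list) -> dict:
--     """
--     Build a color profile from average RGB values and variance.
--     """
--     # Compute variance to detect color variation
--     avg_r_overall = sum(r_vals) // len(r_vals) if r_vals else 128
--     avg_g_overall = sum(g_vals) // len(g_vals) if g_vals else 128
--     avg_b_overall = sum(b_vals) // len(b_vals) if b_vals else 128
--
--     r_var = sum((x - avg_r_overall) ** 2 for x in r_vals) // len(r_vals) if r_vals else 0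
--     g_var = sum((x - avg_g_overall) ** 2 for x in g_vals) // len(g_vals) if g_vals else 0
--     b_var = sum((x - avg_b_overall) ** 2 for x in b_vals) // len(b_vals) if b_vals else 0
--
--     return {
--         'avg_r': avg_r, 'avg_g': avg_g, 'avg_b': avg_b,
--         'r_var': r_var, 'g_var': g_var, 'b_var': b_var,
--         'brightness': (avg_r + avg_g + avg_b) // 3
--     }
-- ===== SOURCE B (Python) =====
-- def _get_color_profile(avg_r: int, avg_g: int, avg_b: int,
--                        r_vals: list, g_vals: list, b_vals: list) -> dict:
--     def stats(vals):
--         # one pass: S = sum(x), Q = sum(x*x); variance via the sum-of-squares identity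
--         if not vals:
--             return 128, 0
--         s = 0
--         q = 0
--         for x in vals:
--             s += x
--             q += x * x
--         n = len(vals)
--         m = s // n
--         return m, (q - 2 * m * s) // n + m * m
--
--     _, r_var = stats(r_vals)
--     _, g_var = stats(g_vals)
--     _, b_var = stats(b_vals)
--     return {
--         'avg_r': avg_r, 'avg_g': avg_g, 'avg_b': avg_b,
--         'r_var': r_var, 'g_var': g_var, 'b_var': b_var,
--         'brightness': (avg_r + avg_g + avg_b) // 3
--     }
-- ===== Notes on version B (the rewrite author's own statement) =====
-- stated objective: alternative
-- what changed: Each channel's mean and variance are computed in a single pass accumulating S=sum(x) and Q=sum(x*x), with variance recovered exactly as (Q-2*m*S)//n + m*m via the sum-of-squares identity, replacing A's two separate passes (mean pass, then squared-deviation pass) per channel.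
import Mathlib
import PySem

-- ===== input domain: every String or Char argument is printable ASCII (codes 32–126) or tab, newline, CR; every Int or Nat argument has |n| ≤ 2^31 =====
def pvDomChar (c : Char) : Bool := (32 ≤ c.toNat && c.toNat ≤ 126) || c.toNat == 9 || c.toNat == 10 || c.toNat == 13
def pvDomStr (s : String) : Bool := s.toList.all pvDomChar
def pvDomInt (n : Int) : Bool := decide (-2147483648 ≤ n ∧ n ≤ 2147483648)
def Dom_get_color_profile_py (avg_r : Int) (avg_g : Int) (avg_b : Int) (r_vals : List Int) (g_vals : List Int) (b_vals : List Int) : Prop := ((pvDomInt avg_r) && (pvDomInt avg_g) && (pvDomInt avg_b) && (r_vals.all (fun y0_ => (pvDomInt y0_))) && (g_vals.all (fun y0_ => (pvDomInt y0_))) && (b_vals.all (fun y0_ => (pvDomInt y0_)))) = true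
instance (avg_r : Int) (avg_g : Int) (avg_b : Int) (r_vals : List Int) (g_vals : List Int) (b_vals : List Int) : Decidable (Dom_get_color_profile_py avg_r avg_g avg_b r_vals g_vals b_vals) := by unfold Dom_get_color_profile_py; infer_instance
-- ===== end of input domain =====

-- B computes each channel's mean and variance in ONE pass (S=Σx, Q=Σx²) using the
-- sum-of-squares identity instead of A's two passes per channel (alternative decomposition).

-- ===== PORT A =====
def get_color_profile_py (avg_r : Int) (avg_g : Int) (avg_b : Int) (r_vals : List Int) (g_vals : List Int) (b_vals : List Int) : List (String × Int) :=
  let avg_r_overall : Int := if r_vals = [] then 128 else PySem.Int.floordiv r_vals.sum (r_vals.length : Int)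
  let avg_g_overall : Int := if g_vals = [] then 128 else PySem.Int.floordiv g_vals.sum (g_vals.length : Int)
  let avg_b_overall : Int := if b_vals = [] then 128 else PySem.Int.floordiv b_vals.sum (b_vals.length : Int)
  let r_var : Int := if r_vals = [] then 0 else PySem.Int.floordiv ((r_vals.map (fun x => (x - avg_r_overall) ^ 2)).sum) (r_vals.length : Int)
  let g_var : Int := if g_vals = [] then 0 else PySem.Int.floordiv ((g_vals.map (fun x => (x - avg_g_overall) ^ 2)).sum) (g_vals.length : Int)
  let b_var : Int := if b_vals = [] then 0 else PySem.Int.floordiv ((b_vals.map (fun x => (x - avg_b_overall) ^ 2)).sum) (b_vals.length : Int)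
  [("avg_r", avg_r), ("avg_g", avg_g), ("avg_b", avg_b),
   ("r_var", r_var), ("g_var", g_var), ("b_var", b_var),
   ("brightness", PySem.Int.floordiv (avg_r + avg_g + avg_b) 3)]

-- ===== PORT B =====
-- one pass per channel: fold accumulating (S, Q), then m = S//n, var = (Q-2mS)//n + m*m
def pvStats (vals : List Int) : Int × Int :=
  if vals = [] then (128, 0)
  else
    let sq := vals.foldl (fun (acc : Int × Int) x => (acc.1 + x, acc.2 + x * x)) (0, 0)
    let n : Int := (vals.length : Int)
    let m := PySem.Int.floordiv sq.1 n
    (m, PySem.Int.floordiv (sq.2 - 2 * m * sq.1) n + m * m)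

def get_color_profile_py_alt (avg_r : Int) (avg_g : Int) (avg_b : Int) (r_vals : List Int) (g_vals : List Int) (b_vals : List Int) : List (String × Int) :=
  let r_var := (pvStats r_vals).2
  let g_var := (pvStats g_vals).2
  let b_var := (pvStats b_vals).2
  [("avg_r", avg_r), ("avg_g", avg_g), ("avg_b", avg_b),
   ("r_var", r_var), ("g_var", g_var), ("b_var", b_var),
   ("brightness", PySem.Int.floordiv (avg_r + avg_g + avg_b) 3)]

-- ===== PRECONDITION & SPEC =====
def Spec_get_color_profile_py (avg_r : Int) (avg_g : Int) (avg_b : Int) (r_vals : List Int) (g_vals : List Int) (b_vals : List Int) (out : List (String × Int)) : Prop := out = get_color_profile_py_alt avg_r avg_g avg_b r_vals g_vals b_vals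
instance (avg_r : Int) (avg_g : Int) (avg_b : Int) (r_vals : List Int) (g_vals : List Int) (b_vals : List Int) (out : List (String × Int)) : Decidable (Spec_get_color_profile_py avg_r avg_g avg_b r_vals g_vals b_vals out) := by unfold Spec_get_color_profile_py; infer_instance

-- ===== CLAIM (what is proved, stated in full; the proofs are below) =====
def Claim_equal_get_color_profile_py : Prop := ∀ (avg_r : Int) (avg_g : Int) (avg_b : Int) (r_vals : List Int) (g_vals : List Int) (b_vals : List Int), Dom_get_color_profile_py avg_r avg_g avg_b r_vals g_vals b_vals → Spec_get_color_profile_py avg_r avg_g avg_b r_vals g_vals b_vals (get_color_profile_py avg_r avg_g avg_b r_vals g_vals b_vals)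

-- ===== LEMMAS AND PROOFS =====

-- the fold computes (init.1 + Σx, init.2 + Σx²)
lemma pv_fold_sum_sq (vals : List Int) (init : Int × Int) :
    vals.foldl (fun (acc : Int × Int) x => (acc.1 + x, acc.2 + x * x)) init
      = (init.1 + vals.sum, init.2 + (vals.map (fun x => x * x)).sum) := by
  induction vals generalizing init with
  | nil => simp
  | cons y ys ih => simp [List.foldl_cons, ih]; constructor <;> ring

-- sum of squared deviations = Q - 2mS + n·m²
lemma pv_sum_sq_dev (vals : List Int) (m : Int) :
    (vals.map (fun x => (x - m) ^ 2)).sum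
      = (vals.map (fun x => x * x)).sum - 2 * m * vals.sum + (vals.length : Int) * m * m := by
  induction vals with
  | nil => simp
  | cons y ys ih => simp [ih]; ring

-- per-channel: A's two-pass variance equals B's one-pass variance
lemma pv_var_eq (vals : List Int) (h : vals ≠ []) :
    PySem.Int.floordiv ((vals.map (fun x => (x - PySem.Int.floordiv vals.sum (vals.length : Int)) ^ 2)).sum) (vals.length : Int)
      = (pvStats vals).2 := by
  have hn : (0 : Int) < (vals.length : Int) := by
    have := List.length_pos_iff.mpr h
    exact_mod_cast this
  simp only [pvStats, if_neg h, pv_fold_sum_sq]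
  set n : Int := (vals.length : Int)
  set s := vals.sum
  set q := (vals.map (fun x => x * x)).sum
  set m := PySem.Int.floordiv s n with hm
  rw [pv_sum_sq_dev]
  have : q - 2 * m * s + n * m * m = (q - 2 * m * s) + (m * m) * n := by ring
  rw [this]
  rw [PySem.Int.floordiv_eq_ediv_of_pos hn, PySem.Int.floordiv_eq_ediv_of_pos hn]
  simp
  exact Int.add_mul_ediv_right _ _ (by omega)

-- ===== VERDICT (by name: the statement is the Claim_ definition above) =====
theorem get_color_profile_py_spec : Claim_equal_get_color_profile_py := by
  intro avg_r avg_g avg_b r_vals g_vals b_vals _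
  unfold Spec_get_color_profile_py get_color_profile_py get_color_profile_py_alt
  by_cases hr : r_vals = [] <;> by_cases hg : g_vals = [] <;> by_cases hb : b_vals = [] <;>
    simp [hr, hg, hb, pvStats, pv_var_eq]
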